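-- pv_equiv track=rewrite | github.com/Conner-Beard/advent_of_code_2024 | day12/main.py | get_slice_sides
-- ===== SOURCE A (Python) =====
-- def group_by_consecutive(values):
--     """
--     takes a list and converts it to a list of consecutive values in the input
--     list
--
--     Args:
--         values (list of int): values to be sorted
--     Returns:
--         (list of list): the input values sorded into consecutive ordered lists
--     """
--     if len(values) == 0:
--         return []
--
--     values.sort()
--     output = []
--
--     previous_value = values[0]
--
--     group = [values[0]]
--     for value in values[1:]:
--         if value == previous_value + 1:
--             group.append(value)
--         else:
--             output.append(group)
--             group = []
--             group.append(value)
--         previous_value = value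
--
--     if group != group[-1]:
--         output.append(group)
--
--     return output
--
-- def get_slice_sides(checked, plot, orientation='row'):
--     """
--     takes a dictinary of vertical or horizontal slices of the plot and counts
--     the consecutive sides that are exposed to other crops
--     Args:
--         checked (dict of list of int): slices of the plot
--
--         plot (set of coordinates): set of adjacent tiles that make up the plot
--
--         orientation ('row' or 'col'): the orientation of the checked values
--     Returns:
--         sides (int): the sides of the checked value that are exposed to other
--         crops
--     """
--     side_count = 0
--     if orientation == 'row':
--         for row, col_list in checked.items():
--             for group in group_by_consecutive(col_list):
--                 top_side = []
--                 bot_side = []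
--                 for col in group:
--                     if (row-1, col) not in plot:
--                         top_side.append(col)
--                     if (row+1, col) not in plot:
--                         bot_side.append(col)
--                 top_count = len(group_by_consecutive(top_side))
--                 bot_count = len(group_by_consecutive(bot_side))
--                 side_count = side_count + top_count + bot_count
--     elif orientation == 'col':
--         for col, row_list in checked.items():
--             for group in group_by_consecutive(row_list):
--                 left_side = []
--                 right_side = []
--                 for row in group:
--                     if (row, col-1) not in plot:
--                         left_side.append(row)
--                     if (row, col+1) not in plot:
--                         right_side.append(row)
--                 left_count = len(group_by_consecutive(left_side))
--                 right_count = len(group_by_consecutive(right_side))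
--                 side_count = side_count + right_count + left_count
--     return side_count
-- ===== SOURCE B (Python) =====
-- def get_slice_sides(checked, plot, orientation='row'):
--     """Single-pass rewrite: sorts each slice in place (as A does) and counts
--     side-run starts inline instead of building side lists and regrouping."""
--     if orientation != 'row' and orientation != 'col':
--         return 0
--     sides = 0
--     for key, vals in checked.items():
--         vals.sort()
--         prev = None
--         prev_exp1 = False
--         prev_exp2 = False
--         for v in vals:
--             if orientation == 'row':
--                 exp1 = (key - 1, v) not in plot
--                 exp2 = (key + 1, v) not in plot
--             else:
--                 exp1 = (v, key - 1) not in plot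
--                 exp2 = (v, key + 1) not in plot
--             new_run = prev is None or v != prev + 1
--             if exp1 and (new_run or not prev_exp1):
--                 sides += 1
--             if exp2 and (new_run or not prev_exp2):
--                 sides += 1
--             prev = v
--             prev_exp1 = exp1
--             prev_exp2 = exp2
--     return sides
-- ===== Notes on version B (the rewrite author's own statement) =====
-- stated objective: simpler
-- what changed: Replaces the per-group construction of top/bottom (left/right) side lists and the extra group_by_consecutive calls on them by one linear scan over each sorted slice that counts exposed-run starts inline with a previous-exposure flag per side.
import Mathlib
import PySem

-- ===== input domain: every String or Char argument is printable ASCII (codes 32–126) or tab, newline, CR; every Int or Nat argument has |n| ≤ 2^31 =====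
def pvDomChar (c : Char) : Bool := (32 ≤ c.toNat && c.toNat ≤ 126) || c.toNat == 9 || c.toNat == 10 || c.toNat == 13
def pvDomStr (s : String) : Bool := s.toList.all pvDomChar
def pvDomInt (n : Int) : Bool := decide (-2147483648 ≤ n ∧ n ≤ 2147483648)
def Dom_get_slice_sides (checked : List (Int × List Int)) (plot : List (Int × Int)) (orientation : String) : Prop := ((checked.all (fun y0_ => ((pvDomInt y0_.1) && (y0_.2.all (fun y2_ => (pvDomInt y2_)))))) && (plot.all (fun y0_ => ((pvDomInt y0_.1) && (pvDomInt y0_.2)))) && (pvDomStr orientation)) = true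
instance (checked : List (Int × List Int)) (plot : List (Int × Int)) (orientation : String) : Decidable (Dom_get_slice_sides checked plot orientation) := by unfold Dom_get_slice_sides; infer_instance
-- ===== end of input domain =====

-- B replaces the build-side-lists-and-regroup inner passes by a single linear scan
-- counting run starts inline (objective: simpler). Both A and B sort each slice list
-- of `checked` in place; equivalence proved here is about the return value.

-- ===== PORT A =====
def group_by_consecutive (values : List Int) : List (List Int) :=
  if values.length = 0 then []
  else
    match PySem.List.sorted values (fun x => x) false with
    | [] => []
    | v0 :: rest =>
      let st := rest.foldl
        (fun (acc : List (List Int) × List Int × Int) (value : Int) =>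
          if value = acc.2.2 + 1 then (acc.1, acc.2.1 ++ [value], value)
          else (acc.1 ++ [acc.2.1], [value], value))
        ([], [v0], v0)
      -- Python's final `if group != group[-1]` compares a list with an int: always True, so append
      st.1 ++ [st.2.1]

def get_slice_sides (checked : List (Int × List Int)) (plot : List (Int × Int)) (orientation : String) : Int :=
  if orientation == "row" then
    checked.foldl (fun side_count rc =>
      (group_by_consecutive rc.2).foldl (fun sc group =>
        let sides := group.foldl (fun (acc : List Int × List Int) col =>
          ((if !(plot.contains (rc.1 - 1, col)) then acc.1 ++ [col] else acc.1),
           (if !(plot.contains (rc.1 + 1, col)) then acc.2 ++ [col] else acc.2))) ([], [])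
        sc + ((group_by_consecutive sides.1).length : Int)
           + ((group_by_consecutive sides.2).length : Int)) side_count) 0
  else if orientation == "col" then
    checked.foldl (fun side_count cr =>
      (group_by_consecutive cr.2).foldl (fun sc group =>
        let sides := group.foldl (fun (acc : List Int × List Int) row =>
          ((if !(plot.contains (row, cr.1 - 1)) then acc.1 ++ [row] else acc.1),
           (if !(plot.contains (row, cr.1 + 1)) then acc.2 ++ [row] else acc.2))) ([], [])
        sc + ((group_by_consecutive sides.2).length : Int)
           + ((group_by_consecutive sides.1).length : Int)) side_count) 0
  else 0

-- ===== PORT B =====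
def get_slice_sides_alt (checked : List (Int × List Int)) (plot : List (Int × Int)) (orientation : String) : Int :=
  if !(orientation == "row") && !(orientation == "col") then 0
  else
    checked.foldl (fun sides kv =>
      let vals := PySem.List.sorted kv.2 (fun x => x) false
      (vals.foldl (fun (st : Int × Option Int × Bool × Bool) v =>
        let exp1 := if orientation == "row" then !(plot.contains (kv.1 - 1, v))
                    else !(plot.contains (v, kv.1 - 1))
        let exp2 := if orientation == "row" then !(plot.contains (kv.1 + 1, v))
                    else !(plot.contains (v, kv.1 + 1))
        let new_run := st.2.1.isNone || decide (v ≠ st.2.1.getD 0 + 1)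
        let s1 := if exp1 && (new_run || !st.2.2.1) then st.1 + 1 else st.1
        let s2 := if exp2 && (new_run || !st.2.2.2) then s1 + 1 else s1
        (s2, some v, exp1, exp2)) (sides, none, false, false)).1) 0

-- ===== PRECONDITION & SPEC =====
def Spec_get_slice_sides (checked : List (Int × List Int)) (plot : List (Int × Int)) (orientation : String) (out : Int) : Prop := out = get_slice_sides_alt checked plot orientation
instance (checked : List (Int × List Int)) (plot : List (Int × Int)) (orientation : String) (out : Int) : Decidable (Spec_get_slice_sides checked plot orientation out) := by unfold Spec_get_slice_sides; infer_instance

-- ===== CLAIM (what is proved, stated in full; the proofs are below) =====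
def Claim_equal_get_slice_sides : Prop := ∀ (checked : List (Int × List Int)) (plot : List (Int × Int)) (orientation : String), Dom_get_slice_sides checked plot orientation → Spec_get_slice_sides checked plot orientation (get_slice_sides checked plot orientation)

-- ===== LEMMAS AND PROOFS =====

-- consecutive-grouping as a plain recursion (proof-side mirror of group_by_consecutive)
def pvChunksGo (prev : Int) (cur : List Int) : List Int → List (List Int)
  | [] => [cur]
  | v :: rest => if v = prev + 1 then pvChunksGo v (cur ++ [v]) rest else cur :: pvChunksGo v [v] rest

def pvChunks : List Int → List (List Int)
  | [] => []
  | v :: rest => pvChunksGo v [v] rest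

def pvBreaks (prev : Int) : List Int → Int
  | [] => 0
  | v :: rest => (if v = prev + 1 then 0 else 1) + pvBreaks v rest

def pvF : List Int → Int
  | [] => 0
  | v :: rest => 1 + pvBreaks v rest

def pvGo (e : Int → Bool) : List Int → Bool → Int
  | [], _ => 0
  | v :: r, pe => (if e v && !pe then 1 else 0) + pvGo e r (e v)

def pvS1h (e : Int → Bool) : List Int → Int
  | [] => 0
  | v :: r => (if e v then 1 else 0) + pvGo e r (e v)

def pvScan1 (e : Int → Bool) : List Int → Option Int → Bool → Int
  | [], _, _ => 0
  | v :: r, prev, pe =>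
      (if e v && ((prev.isNone || decide (v ≠ prev.getD 0 + 1)) || !pe) then 1 else 0)
        + pvScan1 e r (some v) (e v)

theorem gbc_foldl (rest : List Int) : ∀ (out : List (List Int)) (cur : List Int) (prev : Int),
    (let st := rest.foldl
        (fun (acc : List (List Int) × List Int × Int) (value : Int) =>
          if value = acc.2.2 + 1 then (acc.1, acc.2.1 ++ [value], value)
          else (acc.1 ++ [acc.2.1], [value], value)) (out, cur, prev)
     st.1 ++ [st.2.1]) = out ++ pvChunksGo prev cur rest := by
  induction rest with
  | nil => intro out cur prev; simp [pvChunksGo]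
  | cons v r ih =>
    intro out cur prev
    simp only [List.foldl_cons, pvChunksGo]
    by_cases h : v = prev + 1
    · simp [h, ih]
    · simp [h, ih]

theorem gbc_eq (l : List Int) : group_by_consecutive l = pvChunks (PySem.List.sorted l (fun x => x) false) := by
  unfold group_by_consecutive
  by_cases h : l.length = 0
  · have : l = [] := List.length_eq_zero_iff.mp h
    subst this; simp [pvChunks, PySem.List.sorted]
  · simp only [h, if_false]
    rcases hs : PySem.List.sorted l (fun x => x) false with _ | ⟨v0, rest⟩
    · exfalso; exact h (List.length_eq_zero_iff.mpr ((PySem.List.sorted_eq_nil_iff _ _ _).mp hs))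
    · simpa [pvChunks] using gbc_foldl rest [] [v0] v0

theorem chunksGo_len (rest : List Int) : ∀ (prev : Int) (cur : List Int),
    ((pvChunksGo prev cur rest).length : Int) = 1 + pvBreaks prev rest := by
  induction rest with
  | nil => intro prev cur; simp [pvChunksGo, pvBreaks]
  | cons v r ih =>
    intro prev cur
    by_cases h : v = prev + 1 <;> simp [pvChunksGo, pvBreaks, h, ih] <;> ring

theorem pvF_chunks (l : List Int) : ((pvChunks l).length : Int) = pvF l := by
  cases l with
  | nil => simp [pvChunks, pvF]
  | cons v rest => simp [pvChunks, pvF, chunksGo_len]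

theorem breaks_eq_F (prev : Int) (l : List Int) (h : ∀ w ∈ l.head?, w ≠ prev + 1) :
    pvBreaks prev l = pvF l := by
  cases l with
  | nil => simp [pvBreaks, pvF]
  | cons w r =>
    have hw : w ≠ prev + 1 := h w (by simp)
    simp [pvBreaks, pvF, hw]

def pvIsChain : List Int → Prop
  | [] => True
  | [_] => True
  | a :: b :: t => b = a + 1 ∧ pvIsChain (b :: t)

theorem chain_pairwise (l : List Int) (h : pvIsChain l) : l.Pairwise (· < ·) := by
  induction l with
  | nil => simp
  | cons a t ih =>
    cases t with
    | nil => simp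
    | cons b t' =>
      obtain ⟨hab, hrest⟩ := h
      have hp : (b :: t').Pairwise (· < ·) := ih hrest
      refine List.pairwise_cons.mpr ⟨?_, hp⟩
      intro w hw
      rcases List.mem_cons.mp hw with hw | hw
      · omega
      · have := (List.pairwise_cons.mp hp).1 w hw; omega

theorem pvIsChain_append (l : List Int) : ∀ (p v : Int), pvIsChain l → l.getLast? = some p →
    v = p + 1 → pvIsChain (l ++ [v]) := by
  induction l with
  | nil => intro p v _ h; simp at h
  | cons a t ih =>
    intro p v hc hl hv
    cases t with
    | nil =>
      simp at hl; subst hl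
      exact ⟨hv, trivial⟩
    | cons b t' =>
      obtain ⟨hab, hrest⟩ := hc
      have hl' : (b :: t').getLast? = some p := by
        rw [List.getLast?_cons_cons] at hl; exact hl
      exact ⟨hab, ih p v hrest hl' hv⟩

-- core per-chunk lemma: runs of the filtered chunk vs inline counting
theorem main_filter (e : Int → Bool) (t : List Int) : ∀ (prev : Int),
    pvIsChain (prev :: t) →
    (e prev = true → pvBreaks prev (t.filter e) = pvGo e t true) ∧
    (e prev = false → pvF (t.filter e) = pvGo e t false) := by
  induction t with
  | nil => intro prev _; constructor <;> intro _ <;> simp [pvBreaks, pvF, pvGo]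
  | cons v t' ih =>
    intro prev hch
    obtain ⟨hv, hch'⟩ := hch
    have ihv := ih v hch'
    have hpw : (v :: t').Pairwise (· < ·) := chain_pairwise _ hch'
    have hhead : ∀ w ∈ (t'.filter e).head?, w ≠ prev + 1 := by
      intro w hw
      have hmem : w ∈ t'.filter e := List.mem_of_mem_head? hw
      have hw' : w ∈ t' := List.mem_of_mem_filter hmem
      have : v < w := (List.pairwise_cons.mp hpw).1 w hw'
      omega
    constructor
    · intro hep
      cases hev : e v
      · rw [List.filter_cons_of_neg (by simp [hev])]
        rw [breaks_eq_F prev _ hhead, ihv.2 hev]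
        simp [pvGo, hev]
      · rw [List.filter_cons_of_pos (by simp [hev])]
        show (if v = prev + 1 then 0 else 1) + pvBreaks v (t'.filter e) = pvGo e (v :: t') true
        rw [if_pos hv, ihv.1 hev]
        simp [pvGo, hev]
    · intro hep
      cases hev : e v
      · rw [List.filter_cons_of_neg (by simp [hev])]
        rw [ihv.2 hev]
        simp [pvGo, hev]
      · rw [List.filter_cons_of_pos (by simp [hev])]
        show 1 + pvBreaks v (t'.filter e) = pvGo e (v :: t') false
        rw [ihv.1 hev]
        simp [pvGo, hev]

theorem s1h_of_chain (e : Int → Bool) (g : List Int)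
    (h : pvIsChain g) :
    pvF (g.filter e) = pvS1h e g := by
  cases g with
  | nil => simp [pvF, pvS1h]
  | cons p t =>
    have hm := main_filter e t p h
    cases hep : e p
    · rw [List.filter_cons_of_neg (by simp [hep])]
      rw [hm.2 hep]
      simp [pvS1h, hep, pvGo]
    · rw [List.filter_cons_of_pos (by simp [hep])]
      show 1 + pvBreaks p (t.filter e) = pvS1h e (p :: t)
      rw [hm.1 hep]
      simp [pvS1h, hep]

-- any member of a chunk decomposition is a chain, starting from a chain accumulator
theorem chunksGo_chain (rest : List Int) : ∀ (cur : List Int) (prev : Int),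
    pvIsChain cur → cur.getLast? = some prev →
    ∀ g ∈ pvChunksGo prev cur rest, pvIsChain g := by
  induction rest with
  | nil => intro cur prev hc _ g hg; simp [pvChunksGo] at hg; subst hg; exact hc
  | cons v r ih =>
    intro cur prev hc hl g hg
    by_cases h : v = prev + 1
    · simp only [pvChunksGo, if_pos h] at hg
      exact ih (cur ++ [v]) v (pvIsChain_append cur prev v hc hl h) (by simp) g hg
    · simp only [pvChunksGo, if_neg h] at hg
      rcases List.mem_cons.mp hg with hg | hg
      · subst hg; exact hc
      · exact ih [v] v trivial (by simp) g hg

-- scan split lemmas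
theorem go_append (e : Int → Bool) (t : List Int) (v : Int) : ∀ (pe : Bool),
    pvGo e (t ++ [v]) pe
      = pvGo e t pe + (if e v && !(match t.getLast? with | some w => e w | none => pe) then 1 else 0) := by
  induction t with
  | nil => intro pe; simp [pvGo]
  | cons x t' ih =>
    intro pe
    simp only [List.cons_append, pvGo, ih (e x)]
    cases t' with
    | nil => simp [pvGo]
    | cons y t'' =>
      have hg : (y :: t'').getLast? = some ((y :: t'').getLast (by simp)) :=
        List.getLast?_eq_getLast (by simp)
      simp [hg, add_assoc]

theorem s1h_append (e : Int → Bool) (h : Int) (t : List Int) (v : Int) :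
    pvS1h e ((h :: t) ++ [v])
      = pvS1h e (h :: t) + (if e v && !(e ((h :: t).getLast (by simp))) then 1 else 0) := by
  simp only [List.cons_append, pvS1h, go_append]
  cases t with
  | nil => simp [List.getLast]; ring
  | cons y t'' =>
    have hg : (y :: t'').getLast? = some ((y :: t'').getLast (by simp)) :=
      List.getLast?_eq_getLast (by simp)
    have hgl : (h :: y :: t'').getLast (by simp) = (y :: t'').getLast (by simp) := by
      simp [List.getLast]
    simp [hg, hgl]
    ring

theorem pvScan1_cons_cont (e : Int → Bool) (v prev : Int) (r : List Int) (pe : Bool)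
    (hv : v = prev + 1) :
    pvScan1 e (v :: r) (some prev) pe
      = (if e v && !pe then 1 else 0) + pvScan1 e r (some v) (e v) := by
  simp only [pvScan1, Option.isNone_some, Option.getD_some, Bool.false_or]
  have hnv : ¬ (v ≠ prev + 1) := by omega
  simp [hnv]

theorem pvScan1_cons_break (e : Int → Bool) (v prev : Int) (r : List Int) (pe : Bool)
    (hv : ¬ v = prev + 1) :
    pvScan1 e (v :: r) (some prev) pe
      = (if e v then 1 else 0) + pvScan1 e r (some v) (e v) := by
  simp only [pvScan1, Option.isNone_some, Option.getD_some, Bool.false_or]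
  simp [hv]

theorem pvScan1_cons_none (e : Int → Bool) (v : Int) (r : List Int) (pe : Bool) :
    pvScan1 e (v :: r) none pe
      = (if e v then 1 else 0) + pvScan1 e r (some v) (e v) := by
  simp [pvScan1]

theorem scan1_chunksGo (e : Int → Bool) (rest : List Int) : ∀ (cur : List Int) (prev : Int),
    cur ≠ [] → cur.getLast? = some prev →
    ((pvChunksGo prev cur rest).map (pvS1h e)).sum
      = pvS1h e cur + pvScan1 e rest (some prev) (e prev) := by
  induction rest with
  | nil => intro cur prev _ _; simp [pvChunksGo, pvScan1]
  | cons v r ih =>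
    intro cur prev hne hl
    rcases cur with _ | ⟨h0, t0⟩
    · exact absurd rfl hne
    by_cases h : v = prev + 1
    · simp only [pvChunksGo, if_pos h]
      rw [ih ((h0 :: t0) ++ [v]) v (by simp)
        (by rw [show h0 :: t0 ++ [v] = (h0 :: t0) ++ [v] from rfl]; exact List.getLast?_concat)]
      have hlast : (h0 :: t0).getLast (by simp) = prev := by
        have := List.getLast?_eq_getLast (l := h0 :: t0) (by simp)
        rw [hl] at this; exact (Option.some.inj this).symm
      rw [s1h_append, hlast, pvScan1_cons_cont e v prev r (e prev) h]
      ring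
    · simp only [pvChunksGo, if_neg h, List.map_cons, List.sum_cons]
      rw [ih [v] v (by simp) (by simp), pvScan1_cons_break e v prev r (e prev) h]
      simp only [pvS1h, pvGo]
      ring

theorem scan1_chunks (e : Int → Bool) (vs : List Int) :
    ((pvChunks vs).map (pvS1h e)).sum = pvScan1 e vs none false := by
  cases vs with
  | nil => simp [pvChunks, pvScan1]
  | cons v rest =>
    simp only [pvChunks]
    rw [scan1_chunksGo e rest [v] v (by simp) (by simp), pvScan1_cons_none]
    simp only [pvS1h, pvGo]
    ring

-- the A-side inner pair of appended side lists is a pair of filters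
theorem pair_filter (p q : Int → Bool) (g : List Int) : ∀ (a b : List Int),
    g.foldl (fun (acc : List Int × List Int) c =>
        ((if p c then acc.1 ++ [c] else acc.1), (if q c then acc.2 ++ [c] else acc.2))) (a, b)
      = (a ++ g.filter p, b ++ g.filter q) := by
  induction g with
  | nil => intro a b; simp
  | cons c g' ih =>
    intro a b
    simp only [List.foldl_cons, ih, List.filter_cons]
    cases hp : p c <;> cases hq : q c <;> simp

theorem foldl_sum (f : List Int → Int) (l : List (List Int)) : ∀ (s : Int),
    l.foldl (fun acc g => acc + f g) s = s + (l.map f).sum := by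
  induction l with
  | nil => intro s; simp
  | cons g l' ih => intro s; simp [ih]; ring

-- B's fold splits into two independent one-side scans
theorem scanB_split (e1 e2 : Int → Bool) (vs : List Int) : ∀ (s : Int) (prev : Option Int) (p1 p2 : Bool),
    (vs.foldl (fun (st : Int × Option Int × Bool × Bool) v =>
        let x1 := e1 v
        let x2 := e2 v
        let new_run := st.2.1.isNone || decide (v ≠ st.2.1.getD 0 + 1)
        let s1 := if x1 && (new_run || !st.2.2.1) then st.1 + 1 else st.1
        let s2 := if x2 && (new_run || !st.2.2.2) then s1 + 1 else s1
        (s2, some v, x1, x2)) (s, prev, p1, p2)).1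
      = s + pvScan1 e1 vs prev p1 + pvScan1 e2 vs prev p2 := by
  induction vs with
  | nil => intro s prev p1 p2; simp [pvScan1]
  | cons v r ih =>
    intro s prev p1 p2
    simp only [List.foldl_cons, pvScan1]
    rw [ih]
    cases h1 : e1 v && ((prev.isNone || decide (v ≠ prev.getD 0 + 1)) || !p1) <;>
      cases h2 : e2 v && ((prev.isNone || decide (v ≠ prev.getD 0 + 1)) || !p2) <;>
      simp [h1, h2] <;> ring

-- per-slice equality, one side generic
theorem entry_side (e : Int → Bool) (lst : List Int) :
    ((pvChunks (PySem.List.sorted lst (fun x => x) false)).map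
        (fun g => ((group_by_consecutive (g.filter e)).length : Int))).sum
      = pvScan1 e (PySem.List.sorted lst (fun x => x) false) none false := by
  set vs := PySem.List.sorted lst (fun x => x) false with hvs
  rw [← scan1_chunks e vs]
  congr 1
  apply List.map_congr_left
  intro g hg
  have hchain : pvIsChain g := by
    rcases hv : vs with _ | ⟨v0, rest⟩
    · rw [hv] at hg; simp [pvChunks] at hg
    · rw [hv] at hg; simp only [pvChunks] at hg
      exact chunksGo_chain rest [v0] v0 trivial (by simp) g hg
  rw [gbc_eq]
  have hsorted : PySem.List.sorted (g.filter e) (fun x => x) false = g.filter e := by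
    apply PySem.List.sorted_eq_self_of_pairwise
    have := (chain_pairwise g hchain).filter e
    exact this.imp (fun h => le_of_lt h)
  rw [hsorted, pvF_chunks, s1h_of_chain e g hchain]

-- sum of a map of a two-part function splits
theorem sum_map_add (f g : List Int → Int) (l : List (List Int)) :
    (l.map (fun x => f x + g x)).sum = (l.map f).sum + (l.map g).sum := by
  induction l with
  | nil => simp
  | cons x l' ih => simp [ih]; ring

theorem entry_eq (e1 e2 : Int → Bool) (lst : List Int) (s : Int) :
    (group_by_consecutive lst).foldl (fun sc g =>
        sc + ((group_by_consecutive (g.filter e1)).length : Int)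
           + ((group_by_consecutive (g.filter e2)).length : Int)) s
      = s + pvScan1 e1 (PySem.List.sorted lst (fun x => x) false) none false
          + pvScan1 e2 (PySem.List.sorted lst (fun x => x) false) none false := by
  have hb : (fun (sc : Int) (g : List Int) =>
        sc + ((group_by_consecutive (g.filter e1)).length : Int)
           + ((group_by_consecutive (g.filter e2)).length : Int))
      = (fun sc g => sc + (((group_by_consecutive (g.filter e1)).length : Int)
           + ((group_by_consecutive (g.filter e2)).length : Int))) := by
    funext sc g; ring
  rw [hb, foldl_sum, gbc_eq, sum_map_add, entry_side e1 lst, entry_side e2 lst]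
  ring

theorem foldl_accum (l : List (Int × List Int)) (body : Int → (Int × List Int) → Int)
    (E : (Int × List Int) → Int) (h : ∀ s kv, body s kv = s + E kv) :
    ∀ s, l.foldl body s = s + (l.map E).sum := by
  induction l with
  | nil => intro s; simp
  | cons kv rest ih => intro s; simp [h, ih]; ring

-- ===== VERDICT (by name: the statement is the Claim_ definition above) =====
theorem get_slice_sides_spec : Claim_equal_get_slice_sides := by
  intro checked plot orientation _
  unfold Spec_get_slice_sides get_slice_sides get_slice_sides_alt
  by_cases hrow : orientation = "row"
  · subst hrow
    simp only [beq_self_eq_true, Bool.not_true, Bool.false_and, if_true, Bool.false_eq_true,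
      if_false, if_pos rfl]
    rw [foldl_accum checked _
        (fun kv => pvScan1 (fun v => !(plot.contains (kv.1 - 1, v)))
            (PySem.List.sorted kv.2 (fun x => x) false) none false
          + pvScan1 (fun v => !(plot.contains (kv.1 + 1, v)))
            (PySem.List.sorted kv.2 (fun x => x) false) none false)
        (by
          intro s kv
          have hstep : (fun (sc : Int) (g : List Int) =>
              let sides := g.foldl (fun (acc : List Int × List Int) col =>
                ((if !(plot.contains (kv.1 - 1, col)) then acc.1 ++ [col] else acc.1),
                 (if !(plot.contains (kv.1 + 1, col)) then acc.2 ++ [col] else acc.2))) (([] : List Int), ([] : List Int))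
              sc + ((group_by_consecutive sides.1).length : Int)
                 + ((group_by_consecutive sides.2).length : Int))
            = (fun (sc : Int) (g : List Int) =>
                sc + ((group_by_consecutive (g.filter (fun col => !(plot.contains (kv.1 - 1, col))))).length : Int)
                   + ((group_by_consecutive (g.filter (fun col => !(plot.contains (kv.1 + 1, col))))).length : Int)) := by
            funext sc g
            simp only [pair_filter (fun col => !(plot.contains (kv.1 - 1, col)))
                (fun col => !(plot.contains (kv.1 + 1, col))) g [] [], List.nil_append]
          show (group_by_consecutive kv.2).foldl _ s = _
          rw [hstep, entry_eq]
          ring) 0,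
      foldl_accum checked _
        (fun kv => pvScan1 (fun v => !(plot.contains (kv.1 - 1, v)))
            (PySem.List.sorted kv.2 (fun x => x) false) none false
          + pvScan1 (fun v => !(plot.contains (kv.1 + 1, v)))
            (PySem.List.sorted kv.2 (fun x => x) false) none false)
        (by
          intro s kv
          have := scanB_split (fun v => !(plot.contains (kv.1 - 1, v)))
            (fun v => !(plot.contains (kv.1 + 1, v)))
            (PySem.List.sorted kv.2 (fun x => x) false) s none false false
          rw [this]
          ring) 0]
  · by_cases hcol : orientation = "col"
    · subst hcol
      have hne : (("col" : String) == "row") = false := by decide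
      simp only [hne, Bool.false_eq_true, if_false, beq_self_eq_true, Bool.not_true,
        Bool.not_false, Bool.and_false, Bool.false_and, if_true, if_pos rfl]
      rw [foldl_accum checked _
          (fun kv => pvScan1 (fun v => !(plot.contains (v, kv.1 - 1)))
              (PySem.List.sorted kv.2 (fun x => x) false) none false
            + pvScan1 (fun v => !(plot.contains (v, kv.1 + 1)))
              (PySem.List.sorted kv.2 (fun x => x) false) none false)
          (by
            intro s kv
            have hstep : (fun (sc : Int) (g : List Int) =>
                let sides := g.foldl (fun (acc : List Int × List Int) row =>
                  ((if !(plot.contains (row, kv.1 - 1)) then acc.1 ++ [row] else acc.1),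
                   (if !(plot.contains (row, kv.1 + 1)) then acc.2 ++ [row] else acc.2))) (([] : List Int), ([] : List Int))
                sc + ((group_by_consecutive sides.2).length : Int)
                   + ((group_by_consecutive sides.1).length : Int))
              = (fun (sc : Int) (g : List Int) =>
                  sc + ((group_by_consecutive (g.filter (fun row => !(plot.contains (row, kv.1 + 1))))).length : Int)
                     + ((group_by_consecutive (g.filter (fun row => !(plot.contains (row, kv.1 - 1))))).length : Int)) := by
              funext sc g
              simp only [pair_filter (fun row => !(plot.contains (row, kv.1 - 1)))
                  (fun row => !(plot.contains (row, kv.1 + 1))) g [] [], List.nil_append]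
            show (group_by_consecutive kv.2).foldl _ s = _
            rw [hstep, entry_eq]
            ring) 0,
        foldl_accum checked _
          (fun kv => pvScan1 (fun v => !(plot.contains (v, kv.1 - 1)))
              (PySem.List.sorted kv.2 (fun x => x) false) none false
            + pvScan1 (fun v => !(plot.contains (v, kv.1 + 1)))
              (PySem.List.sorted kv.2 (fun x => x) false) none false)
          (by
            intro s kv
            have := scanB_split (fun v => !(plot.contains (v, kv.1 - 1)))
              (fun v => !(plot.contains (v, kv.1 + 1)))
              (PySem.List.sorted kv.2 (fun x => x) false) s none false false
            rw [this]
            ring) 0]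
    · have h1 : (orientation == "row") = false := by
        cases h : orientation == "row"
        · rfl
        · exact absurd (by simpa using h) hrow
      have h2 : (orientation == "col") = false := by
        cases h : orientation == "col"
        · rfl
        · exact absurd (by simpa using h) hcol
      simp [h1, h2]
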